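-- pv_equiv track=rewrite | github.com/Gnoyh/programmers | ps_131127.py | solution
-- ===== SOURCE A (Python) =====
-- def solution(want, number, discount):
--     result = 0
--
--     want_set = {}
--     result_set = {}
--
--     for i in range(len(want)):
--         want_set[want[i]] = number[i]
--         result_set[want[i]] = 0
--
--     for i in discount[: 10]:
--         if result_set.get(i) != None:
--             result_set[i] += 1
--
--     if want_set == result_set:
--         result += 1
--
--     for i in range(10, len(discount)):
--         if result_set.get(discount[i - 10]) != None:
--             result_set[discount[i - 10]] -= 1
--
--         if result_set.get(discount[i]) != None:
--             result_set[discount[i]] += 1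
--
--         if want_set == result_set:
--             result += 1
--
--     return result
-- ===== SOURCE B (Python) =====
-- def solution(want, number, discount):
--     target = dict(zip(want, number))
--     need = len(target)
--     cnt = dict.fromkeys(target, 0)
--     matched = sum(1 for v in target.values() if v == 0)
--     result = 0
--     n = len(discount)
--     for i in range(n):
--         item = discount[i]
--         if item in cnt:
--             if cnt[item] == target[item]:
--                 matched -= 1
--             cnt[item] += 1
--             if cnt[item] == target[item]:
--                 matched += 1
--         if i >= 10:
--             old = discount[i - 10]
--             if old in cnt:
--                 if cnt[old] == target[old]:
--                     matched -= 1
--                 cnt[old] -= 1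
--                 if cnt[old] == target[old]:
--                     matched += 1
--         if i >= 9 and matched == need:
--             result += 1
--     if n < 10 and matched == need:
--         result += 1
--     return result
-- ===== Notes on version B (the rewrite author's own statement) =====
-- stated objective: alternative
-- what changed: B replaces A's per-window dict-equality comparison by a single pass that maintains a running counter of keys whose window tally equals the wanted quantity, checking a window by one integer comparison instead of comparing whole dicts.
import Mathlib
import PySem

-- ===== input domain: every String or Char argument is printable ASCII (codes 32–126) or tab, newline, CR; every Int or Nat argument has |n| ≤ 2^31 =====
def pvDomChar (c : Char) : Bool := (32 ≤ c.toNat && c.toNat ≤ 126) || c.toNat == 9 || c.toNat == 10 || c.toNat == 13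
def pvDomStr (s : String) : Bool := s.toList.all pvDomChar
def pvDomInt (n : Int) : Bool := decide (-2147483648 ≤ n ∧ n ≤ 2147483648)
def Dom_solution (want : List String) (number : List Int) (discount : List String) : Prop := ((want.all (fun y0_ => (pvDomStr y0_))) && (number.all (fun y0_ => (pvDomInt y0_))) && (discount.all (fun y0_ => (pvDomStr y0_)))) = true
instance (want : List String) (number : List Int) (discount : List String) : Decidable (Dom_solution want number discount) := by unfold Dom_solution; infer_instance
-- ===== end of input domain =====

-- B replaces A's per-window dict-equality scan by a running "matched keys" counter:
-- a genuinely different bookkeeping of the sliding window with the same results.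


-- ===== PORT A =====
-- Literal port of A.  Python's dict `==` is order-insensitive, but in A `want_set` and
-- `result_set` are always built by the same loop over `want` (same keys, same insertion
-- order, updates in place), so `Dict` BEq (items-list equality) computes the same Bool.
-- `stepA` is the body of A's `for i in range(10, len(discount))` loop, step for step.
def stepA (wantSet : PySem.Dict String Int) (discount : List String)
    (st : Int × PySem.Dict String Int) (i : Int) : Int × PySem.Dict String Int :=
  let k1 := PySem.List.pyGetD discount (i - 10) ""
  let d1 := if (st.2.get? k1).isSome then st.2.insert k1 (st.2.getD k1 0 - 1) else st.2
  let k2 := PySem.List.pyGetD discount i ""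
  let d2 := if (d1.get? k2).isSome then d1.insert k2 (d1.getD k2 0 + 1) else d1
  (if wantSet == d2 then st.1 + 1 else st.1, d2)

def solution (want : List String) (number : List Int) (discount : List String) : Int :=
  let init : PySem.Dict String Int × PySem.Dict String Int :=
    (PySem.List.pyRange 0 (want.length : Int) 1).foldl
      (fun st i =>
        (st.1.insert (PySem.List.pyGetD want i "") (PySem.List.pyGetD number i 0),
         st.2.insert (PySem.List.pyGetD want i "") 0))
      (PySem.Dict.empty, PySem.Dict.empty)
  let wantSet := init.1
  let rs0 := (PySem.List.slice discount none (some 10)).foldl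
      (fun d k => if (d.get? k).isSome then d.insert k (d.getD k 0 + 1) else d) init.2
  let r0 : Int := if wantSet == rs0 then 0 + 1 else 0
  ((PySem.List.pyRange 10 (discount.length : Int) 1).foldl (stepA wantSet discount) (r0, rs0)).1

-- ===== PORT B =====
-- Port of B (Source B): one pass over `discount`; `stepB` is the body of B's single loop,
-- state = (cnt, matched, result).
def stepB (target : PySem.Dict String Int) (need : Int) (discount : List String)
    (st : PySem.Dict String Int × Int × Int) (i : Int) : PySem.Dict String Int × Int × Int :=
  let item := PySem.List.pyGetD discount i ""
  let p1 :=
    if st.1.contains item then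
      let m := if st.1.getD item 0 == target.getD item 0 then st.2.1 - 1 else st.2.1
      let c := st.1.insert item (st.1.getD item 0 + 1)
      (c, if c.getD item 0 == target.getD item 0 then m + 1 else m)
    else (st.1, st.2.1)
  let p2 :=
    if 10 ≤ i then
      let old := PySem.List.pyGetD discount (i - 10) ""
      if p1.1.contains old then
        let m := if p1.1.getD old 0 == target.getD old 0 then p1.2 - 1 else p1.2
        let c := p1.1.insert old (p1.1.getD old 0 - 1)
        (c, if c.getD old 0 == target.getD old 0 then m + 1 else m)
      else p1
    else p1
  let r := if 9 ≤ i then (if p2.2 == need then st.2.2 + 1 else st.2.2) else st.2.2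
  (p2.1, p2.2, r)

def solution_alt (want : List String) (number : List Int) (discount : List String) : Int :=
  let target : PySem.Dict String Int :=
    (want.zip number).foldl (fun d kv => d.insert kv.1 kv.2) PySem.Dict.empty
  let need : Int := (target.size : Int)
  let cnt0 : PySem.Dict String Int :=
    target.keys.foldl (fun d k => d.insert k 0) PySem.Dict.empty
  let m0 : Int := target.values.foldl (fun acc v => if v == 0 then acc + 1 else acc) 0
  let fin := (PySem.List.pyRange 0 (discount.length : Int) 1).foldl
      (stepB target need discount) (cnt0, m0, 0)
  if discount.length < 10 then (if fin.2.1 == need then fin.2.2 + 1 else fin.2.2) else fin.2.2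

-- ===== PRECONDITION & SPEC =====
-- A indexes `number[i]` for every i < len(want): when `number` is shorter than `want`
-- Python raises IndexError, so exactly those inputs are excluded.
def Pre_solution (want : List String) (number : List Int) (discount : List String) : Prop :=
  want.length ≤ number.length
instance (want : List String) (number : List Int) (discount : List String) : Decidable (Pre_solution want number discount) := by unfold Pre_solution; infer_instance

def pvWitness_solution : List String × List Int × List String :=
  (["a", "b"], [2, 0], ["a", "x", "a"])


def Spec_solution (want : List String) (number : List Int) (discount : List String) (out : Int) : Prop := out = solution_alt want number discount
instance (want : List String) (number : List Int) (discount : List String) (out : Int) : Decidable (Spec_solution want number discount out) := by unfold Spec_solution; infer_instance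

-- ===== CLAIM (what is proved, stated in full; the proofs are below) =====
def Claim_equal_solution : Prop := ∀ (want : List String) (number : List Int) (discount : List String), Dom_solution want number discount → Pre_solution want number discount → Spec_solution want number discount (solution want number discount)


-- ===== LEMMAS AND PROOFS =====

-- Proof-side abbreviations: B's target dict, prefix counts P, sliding-window counts V,
-- the per-window check pvOK, the zero-initialised counter dict pvZ, and the common spec.
def pvTarget (want : List String) (number : List Int) : PySem.Dict String Int :=
  (want.zip number).foldl (fun d kv => d.insert kv.1 kv.2) PySem.Dict.empty

def pvZ (want : List String) (number : List Int) : PySem.Dict String Int :=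
  (want.zip number).foldl (fun d kv => d.insert kv.1 0) PySem.Dict.empty

def pvP (discount : List String) (m : Nat) (k : String) : Int := ((discount.take m).count k : Int)

def pvV (discount : List String) (j : Nat) (k : String) : Int :=
  pvP discount j k - pvP discount (j - 10) k

def pvOK (want : List String) (number : List Int) (discount : List String) (j : Nat) : Bool :=
  decide (∀ k ∈ (pvTarget want number).keys,
    pvV discount j k = (pvTarget want number).getD k 0)

def pvSpec (want : List String) (number : List Int) (discount : List String) : Int :=
  (((List.range' 10 (max 1 (discount.length - 9))).countP (pvOK want number discount) : Nat) : Int)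

lemma pvK_nodup (want : List String) (number : List Int) : (pvTarget want number).keys.Nodup := by
  unfold pvTarget
  exact PySem.Dict.nodup_keys_foldl_insert_key (want.zip number) Prod.fst (fun _ kv => kv.2)
    PySem.Dict.empty (by simp)

lemma dict_beq_iff (d e : PySem.Dict String Int) : (d == e) = true ↔ d = e := by
  constructor
  · intro h; exact PySem.Dict.ext (by exact beq_iff_eq.mp h)
  · rintro rfl; show (d.items == d.items) = true; exact beq_iff_eq.mpr rfl

-- prefix-count facts
lemma pvP_zero (discount : List String) (k : String) : pvP discount 0 k = 0 := by
  simp [pvP]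

lemma pvP_succ (discount : List String) (m : Nat) (h : m < discount.length) (k : String) :
    pvP discount (m + 1) k
      = pvP discount m k + (if discount[m] = k then 1 else 0) := by
  unfold pvP
  rw [List.take_add_one, List.getElem?_eq_getElem h, List.count_append]
  by_cases hk : discount[m] = k <;> simp [hk]

lemma pvP_clamp (discount : List String) (m : Nat) (h : discount.length ≤ m) (k : String) :
    pvP discount m k = pvP discount discount.length k := by
  unfold pvP
  rw [List.take_of_length_le h, List.take_of_length_le (le_refl _)]

-- window-count step facts
lemma pvV_zero (discount : List String) (k : String) : pvV discount 0 k = 0 := by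
  simp [pvV, pvP_zero]

lemma pvV_step_lo (discount : List String) (j : Nat) (hj : j < 10) (hn : j < discount.length)
    (k : String) :
    pvV discount (j + 1) k = pvV discount j k + (if discount[j] = k then 1 else 0) := by
  unfold pvV
  have h1 : j + 1 - 10 = 0 := by omega
  have h2 : j - 10 = 0 := by omega
  rw [h1, h2, pvP_succ discount j hn k]
  ring

lemma pvV_step_hi (discount : List String) (j : Nat) (hj : 10 ≤ j) (hn : j < discount.length)
    (k : String) :
    pvV discount (j + 1) k
      = pvV discount j k + (if discount[j] = k then 1 else 0)
          - (if discount[j - 10]'(by omega) = k then 1 else 0) := by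
  unfold pvV
  have h1 : j + 1 - 10 = (j - 10) + 1 := by omega
  rw [h1, pvP_succ discount j hn k, pvP_succ discount (j - 10) (by omega) k]
  ring

-- counting a pointwise update
lemma countP_update (K : List String) (p q : String → Bool) (x : String)
    (hnd : K.Nodup) (hx : x ∈ K) (hagree : ∀ y ∈ K, y ≠ x → p y = q y) :
    (K.countP q : Int)
      = (K.countP p : Int) + ((if q x then 1 else 0) - (if p x then 1 else 0)) := by
  induction K with
  | nil => cases hx
  | cons a t ih =>
    rcases List.nodup_cons.mp hnd with ⟨ha, hnt⟩
    rcases List.mem_cons.mp hx with rfl | hxt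
    · have ht : t.countP p = t.countP q := by
        apply List.countP_congr
        intro y hy
        have := hagree y (List.mem_cons_of_mem _ hy) (fun e => ha (e ▸ hy))
        rw [this]
      rw [List.countP_cons, List.countP_cons, ht]
      by_cases hp : p x <;> by_cases hq : q x <;> simp [hp, hq] <;> push_cast <;> ring
    · have hpa : p a = q a := hagree a List.mem_cons_self (fun e => ha (e ▸ hxt))
      have := ih hnt hxt (fun y hy hne => hagree y (List.mem_cons_of_mem _ hy) hne)
      rw [List.countP_cons, List.countP_cons, hpa]
      by_cases hq : q a <;> simp [hq] at this ⊢ <;> push_cast at this ⊢ <;> omega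

-- the guarded "bump" of A's update sites: keys and values
lemma bump_keys (d : PySem.Dict String Int) (x : String) (v : Int) :
    (if (d.get? x).isSome then d.insert x v else d).keys = d.keys := by
  by_cases h : (d.get? x).isSome
  · rw [if_pos h]
    exact PySem.Dict.keys_insert_of_contains d _
      ((PySem.Dict.contains_eq_isSome_get? d x).trans (by rw [h]))
  · rw [if_neg h]

lemma bump_getD (d : PySem.Dict String Int) (x : String) (v : Int) (k : String) :
    (if (d.get? x).isSome then d.insert x v else d).getD k 0
      = if x = k ∧ x ∈ d.keys then v else d.getD k 0 := by
  by_cases h : (d.get? x).isSome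
  · have hc : d.contains x = true := (PySem.Dict.contains_eq_isSome_get? d x).trans (by rw [h])
    have hmem : x ∈ d.keys := (PySem.Dict.contains_iff_mem_keys d x).mp hc
    rw [if_pos h]
    by_cases hk : x = k
    · subst hk; rw [PySem.Dict.getD_insert_self, if_pos ⟨rfl, hmem⟩]
    · rw [PySem.Dict.getD_insert_of_ne _ _ _ (fun e => hk e.symm), if_neg (by tauto)]
  · have hc : d.contains x = false := by
      have := PySem.Dict.contains_eq_isSome_get? d x
      simp [h] at this; exact this
    have hmem : x ∉ d.keys := fun hm => by
      rw [(PySem.Dict.contains_iff_mem_keys d x).mpr hm] at hc; cases hc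
    rw [if_neg h, if_neg (by tauto)]

-- converting A's dict-equality check into the pointwise condition
lemma check_iff (want : List String) (number : List Int) (d : PySem.Dict String Int)
    (hk : d.keys = (pvTarget want number).keys) :
    ((pvTarget want number == d) = true)
      ↔ (∀ k ∈ (pvTarget want number).keys, d.getD k 0 = (pvTarget want number).getD k 0) := by
  rw [dict_beq_iff]
  constructor
  · rintro rfl; exact fun k _ => rfl
  · intro h
    apply PySem.Dict.ext
    rw [PySem.Dict.items_eq_map_keys (pvTarget want number) (pvK_nodup want number) 0,
        PySem.Dict.items_eq_map_keys d (hk ▸ pvK_nodup want number) 0, hk]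
    apply (List.map_inj_left).mpr
    intro k hkk
    rw [h k hkk]

-- Bool-valued version of the check, against a dict holding the window counts V j
lemma check_eq_pvOK (want : List String) (number : List Int) (discount : List String)
    (j : Nat) (d : PySem.Dict String Int)
    (hk : d.keys = (pvTarget want number).keys)
    (hv : ∀ k ∈ (pvTarget want number).keys, d.getD k 0 = pvV discount j k) :
    (pvTarget want number == d) = pvOK want number discount j := by
  rw [Bool.eq_iff_iff, check_iff want number d hk]
  unfold pvOK
  rw [decide_eq_true_iff]
  constructor
  · intro h k hkk; rw [← hv k hkk, ← h k hkk]
  · intro h k hkk; rw [hv k hkk, ← h k hkk]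

-- a fold over range(len(want)) reading want[i], number[i] is a fold over zip(want, number)
lemma foldl_idx_zip {σ : Type} (g : σ → String → Int → σ) (want : List String) (number : List Int)
    (h : want.length ≤ number.length) :
    ∀ (fuel j : Nat), fuel = want.length - j → ∀ (init : σ),
      (PySem.List.pyRange (j : Int) (want.length : Int) 1).foldl
          (fun s i => g s (PySem.List.pyGetD want i "") (PySem.List.pyGetD number i 0)) init
        = ((want.drop j).zip (number.drop j)).foldl (fun s kv => g s kv.1 kv.2) init := by
  intro fuel
  induction fuel with
  | zero =>
    intro j hj init
    have hj' : want.length ≤ j := by omega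
    rw [PySem.List.pyRange_one_eq_nil (by exact_mod_cast hj'), List.drop_eq_nil_of_le hj']
    simp
  | succ f ih =>
    intro j hj init
    by_cases hlt : j < want.length
    · rw [PySem.List.pyRange_one_cons (by exact_mod_cast hlt), List.foldl_cons,
          List.drop_eq_getElem_cons hlt, List.drop_eq_getElem_cons (lt_of_lt_of_le hlt h),
          List.zip_cons_cons, List.foldl_cons]
      have e1 : PySem.List.pyGetD want (j : Int) "" = want[j] := by
        rw [PySem.List.pyGetD_natCast]; exact List.getD_eq_getElem _ _ hlt
      have e2 : PySem.List.pyGetD number (j : Int) 0 = number[j]'(lt_of_lt_of_le hlt h) := by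
        rw [PySem.List.pyGetD_natCast]; exact List.getD_eq_getElem _ _ _
      rw [e1, e2]
      have ej : ((j : Int) + 1) = ((j + 1 : Nat) : Int) := by push_cast; ring
      rw [ej]
      exact ih (j + 1) (by omega) _
    · rw [PySem.List.pyRange_one_eq_nil (by exact_mod_cast (by omega : want.length ≤ j)),
          List.drop_eq_nil_of_le (by omega)]
      simp

-- the fold building a dict with constant value 0
lemma getD_foldl_insert_zero {β : Type} (key : β → String) :
    ∀ (l : List β) (d : PySem.Dict String Int) (k : String),
      (l.foldl (fun d x => d.insert (key x) 0) d).getD k 0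
        = if k ∈ l.map key then 0 else d.getD k 0 := by
  intro l
  induction l with
  | nil => intro d k; simp
  | cons a t ih =>
    intro d k
    rw [List.foldl_cons, ih]
    by_cases hm : k ∈ t.map key
    · simp [hm]
    · by_cases hk : k = key a
      · simp [hm, hk, PySem.Dict.getD_insert_self]
      · simp [hm, hk, PySem.Dict.getD_insert_of_ne _ _ _ hk]

-- A's first-window loop: a guarded-increment fold adds the element counts
lemma addfold_keys : ∀ (l : List String) (d : PySem.Dict String Int),
    (l.foldl (fun d k => if (d.get? k).isSome then d.insert k (d.getD k 0 + 1) else d) d).keys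
      = d.keys := by
  intro l
  induction l with
  | nil => intro d; rfl
  | cons a t ih =>
    intro d
    rw [List.foldl_cons, ih]
    exact bump_keys d a _

lemma addfold_getD : ∀ (l : List String) (d : PySem.Dict String Int) (k : String), k ∈ d.keys →
    (l.foldl (fun d k => if (d.get? k).isSome then d.insert k (d.getD k 0 + 1) else d) d).getD k 0
      = d.getD k 0 + (l.count k : Int) := by
  intro l
  induction l with
  | nil => intro d k _; simp
  | cons a t ih =>
    intro d k hk
    rw [List.foldl_cons, ih _ k (by rw [bump_keys d a _]; exact hk),
        bump_getD d a _ k]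
    by_cases ha : a = k
    · subst ha
      rw [if_pos ⟨rfl, hk⟩, List.count_cons_self]
      push_cast; ring
    · rw [if_neg (by tauto)]
      rw [List.count_cons_of_ne ha]

-- A's sliding-window update: remove the element leaving the window, add the new one
lemma bump2_facts (d : PySem.Dict String Int) (x1 x2 : String) (K : List String)
    (hk : d.keys = K) :
    (if ((if (d.get? x1).isSome then d.insert x1 (d.getD x1 0 - 1) else d).get? x2).isSome then
        (if (d.get? x1).isSome then d.insert x1 (d.getD x1 0 - 1) else d).insert x2
          ((if (d.get? x1).isSome then d.insert x1 (d.getD x1 0 - 1) else d).getD x2 0 + 1)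
      else (if (d.get? x1).isSome then d.insert x1 (d.getD x1 0 - 1) else d)).keys = K
    ∧ ∀ k ∈ K,
        (if ((if (d.get? x1).isSome then d.insert x1 (d.getD x1 0 - 1) else d).get? x2).isSome then
            (if (d.get? x1).isSome then d.insert x1 (d.getD x1 0 - 1) else d).insert x2
              ((if (d.get? x1).isSome then d.insert x1 (d.getD x1 0 - 1) else d).getD x2 0 + 1)
          else (if (d.get? x1).isSome then d.insert x1 (d.getD x1 0 - 1) else d)).getD k 0
          = d.getD k 0 + (if x2 = k then 1 else 0) - (if x1 = k then 1 else 0) := by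
  constructor
  · rw [bump_keys, bump_keys, hk]
  · intro k hkk
    rw [bump_getD, bump_getD d x1 _ k]
    have hd1k : (if (d.get? x1).isSome then d.insert x1 (d.getD x1 0 - 1) else d).keys = K := by
      rw [bump_keys, hk]
    by_cases h2 : x2 = k
    · subst h2
      have hmem : x2 ∈ (if (d.get? x1).isSome then d.insert x1 (d.getD x1 0 - 1) else d).keys := by
        rw [hd1k]; exact hkk
      rw [if_pos ⟨rfl, hmem⟩, bump_getD d x1 _ x2]
      by_cases h1 : x1 = x2
      · subst h1
        rw [if_pos ⟨rfl, hk ▸ hkk⟩]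
        simp
      · rw [if_neg (by tauto)]
        simp [h1]
    · rw [if_neg (by tauto)]
      by_cases h1 : x1 = k
      · subst h1
        rw [if_pos ⟨rfl, hk ▸ hkk⟩]
        simp [h2]
      · rw [if_neg (by tauto)]
        simp [h2, h1]

-- A's main loop
lemma A_loop (want : List String) (number : List Int) (discount : List String) :
    ∀ (fuel j : Nat) (r : Int) (d : PySem.Dict String Int),
      fuel = discount.length - j → 10 ≤ j →
      d.keys = (pvTarget want number).keys →
      (∀ k ∈ (pvTarget want number).keys, d.getD k 0 = pvV discount j k) →
      ((PySem.List.pyRange (j : Int) (discount.length : Int) 1).foldl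
          (stepA (pvTarget want number) discount) (r, d)).1
        = r + (((List.range' (j + 1) (discount.length + 1 - (j + 1))).countP
              (pvOK want number discount) : Nat) : Int) := by
  intro fuel
  induction fuel with
  | zero =>
    intro j r d hj h10 hk hv
    have hnj : discount.length ≤ j := by omega
    rw [PySem.List.pyRange_one_eq_nil (by exact_mod_cast hnj),
        (by omega : discount.length + 1 - (j + 1) = 0)]
    simp
  | succ f ih =>
    intro j r d hj h10 hk hv
    by_cases hlt : j < discount.length
    · rw [PySem.List.pyRange_one_cons (by exact_mod_cast hlt), List.foldl_cons]
      have hx1 : PySem.List.pyGetD discount ((j : Int) - 10) "" = discount[j - 10]'(by omega) := by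
        rw [(by omega : ((j : Int) - 10) = ((j - 10 : Nat) : Int)), PySem.List.pyGetD_natCast]
        exact List.getD_eq_getElem _ _ (by omega)
      have hx2 : PySem.List.pyGetD discount (j : Int) "" = discount[j]'hlt := by
        rw [PySem.List.pyGetD_natCast]
        exact List.getD_eq_getElem _ _ hlt
      obtain ⟨hd2k, hd2v⟩ :=
        bump2_facts d (discount[j - 10]'(by omega)) (discount[j]'hlt) _ hk
      have hvv : ∀ k ∈ (pvTarget want number).keys,
          (if ((if (d.get? (discount[j - 10]'(by omega))).isSome then
                  d.insert (discount[j - 10]'(by omega)) (d.getD (discount[j - 10]'(by omega)) 0 - 1)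
                else d).get? (discount[j]'hlt)).isSome then
              (if (d.get? (discount[j - 10]'(by omega))).isSome then
                  d.insert (discount[j - 10]'(by omega)) (d.getD (discount[j - 10]'(by omega)) 0 - 1)
                else d).insert (discount[j]'hlt)
                ((if (d.get? (discount[j - 10]'(by omega))).isSome then
                    d.insert (discount[j - 10]'(by omega)) (d.getD (discount[j - 10]'(by omega)) 0 - 1)
                  else d).getD (discount[j]'hlt) 0 + 1)
            else (if (d.get? (discount[j - 10]'(by omega))).isSome then
                  d.insert (discount[j - 10]'(by omega)) (d.getD (discount[j - 10]'(by omega)) 0 - 1)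
                else d)).getD k 0 = pvV discount (j + 1) k := by
        intro k hkk
        rw [hd2v k hkk, hv k hkk, pvV_step_hi discount j h10 hlt k]
      have hchk := check_eq_pvOK want number discount (j + 1) _ hd2k hvv
      have hstA : stepA (pvTarget want number) discount (r, d) (j : Int)
          = (if pvOK want number discount (j + 1) then r + 1 else r,
             (if ((if (d.get? (discount[j - 10]'(by omega))).isSome then
                      d.insert (discount[j - 10]'(by omega)) (d.getD (discount[j - 10]'(by omega)) 0 - 1)
                    else d).get? (discount[j]'hlt)).isSome then
                  (if (d.get? (discount[j - 10]'(by omega))).isSome then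
                      d.insert (discount[j - 10]'(by omega)) (d.getD (discount[j - 10]'(by omega)) 0 - 1)
                    else d).insert (discount[j]'hlt)
                    ((if (d.get? (discount[j - 10]'(by omega))).isSome then
                        d.insert (discount[j - 10]'(by omega)) (d.getD (discount[j - 10]'(by omega)) 0 - 1)
                      else d).getD (discount[j]'hlt) 0 + 1)
                else (if (d.get? (discount[j - 10]'(by omega))).isSome then
                      d.insert (discount[j - 10]'(by omega)) (d.getD (discount[j - 10]'(by omega)) 0 - 1)
                    else d))) := by
        unfold stepA
        dsimp only
        rw [hx1, hx2, hchk]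
      rw [hstA]
      rw [(by push_cast; ring : ((j : Int) + 1) = ((j + 1 : Nat) : Int))]
      rw [ih (j + 1) (if pvOK want number discount (j + 1) then r + 1 else r) _
            (by omega) (by omega) hd2k hvv]
      rw [(by omega : discount.length + 1 - (j + 1) = (discount.length + 1 - (j + 2)) + 1),
          List.range'_succ, List.countP_cons]
      by_cases hok : pvOK want number discount (j + 1) <;> simp [hok] <;> push_cast <;> ring
    · rw [PySem.List.pyRange_one_eq_nil (by exact_mod_cast (by omega : discount.length ≤ j)),
          (by omega : discount.length + 1 - (j + 1) = 0)]
      simp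

-- B's guarded increment of the running counter, with the `matched` bookkeeping
lemma bumpP_add (T : PySem.Dict String Int) (K : List String) (hnd : K.Nodup)
    (c : PySem.Dict String Int) (x : String) (m : Int)
    (hk : c.keys = K)
    (hm : m = (K.countP (fun k => c.getD k 0 == T.getD k 0) : Int)) :
    (if c.contains x then
        (c.insert x (c.getD x 0 + 1),
         if (c.insert x (c.getD x 0 + 1)).getD x 0 == T.getD x 0 then
           (if c.getD x 0 == T.getD x 0 then m - 1 else m) + 1
         else (if c.getD x 0 == T.getD x 0 then m - 1 else m))
      else (c, m)).1.keys = K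
    ∧ (∀ k ∈ K,
        (if c.contains x then
            (c.insert x (c.getD x 0 + 1),
             if (c.insert x (c.getD x 0 + 1)).getD x 0 == T.getD x 0 then
               (if c.getD x 0 == T.getD x 0 then m - 1 else m) + 1
             else (if c.getD x 0 == T.getD x 0 then m - 1 else m))
          else (c, m)).1.getD k 0 = c.getD k 0 + (if x = k then 1 else 0))
    ∧ (if c.contains x then
          (c.insert x (c.getD x 0 + 1),
           if (c.insert x (c.getD x 0 + 1)).getD x 0 == T.getD x 0 then
             (if c.getD x 0 == T.getD x 0 then m - 1 else m) + 1
           else (if c.getD x 0 == T.getD x 0 then m - 1 else m))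
        else (c, m)).2
      = (K.countP (fun k =>
          (if c.contains x then
              (c.insert x (c.getD x 0 + 1),
               if (c.insert x (c.getD x 0 + 1)).getD x 0 == T.getD x 0 then
                 (if c.getD x 0 == T.getD x 0 then m - 1 else m) + 1
               else (if c.getD x 0 == T.getD x 0 then m - 1 else m))
            else (c, m)).1.getD k 0 == T.getD k 0) : Int) := by
  by_cases hc : c.contains x
  · have hmem : x ∈ K := hk ▸ (PySem.Dict.contains_iff_mem_keys c x).mp hc
    rw [if_pos hc]
    refine ⟨by rw [PySem.Dict.keys_insert_of_contains c _ hc, hk], ?_, ?_⟩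
    · intro k hkk
      by_cases hx : x = k
      · subst hx; rw [PySem.Dict.getD_insert_self, if_pos rfl]
      · rw [PySem.Dict.getD_insert_of_ne _ _ _ (fun e => hx e.symm), if_neg hx]
        ring
    · dsimp only
      rw [countP_update K (fun k => c.getD k 0 == T.getD k 0)
            (fun k => (c.insert x (c.getD x 0 + 1)).getD k 0 == T.getD k 0) x hnd hmem
            (fun y _ hy => by
              show (c.getD y 0 == T.getD y 0)
                = ((c.insert x (c.getD x 0 + 1)).getD y 0 == T.getD y 0)
              rw [PySem.Dict.getD_insert_of_ne _ _ _ hy]), ← hm,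
          PySem.Dict.getD_insert_self]
      by_cases h1 : (c.getD x 0 + 1 == T.getD x 0) = true <;>
        by_cases h2 : (c.getD x 0 == T.getD x 0) = true <;>
          simp only [h1, h2, Bool.not_eq_true] at * <;> simp [h1, h2] <;> ring
  · have hmem : x ∉ K := fun hx => by
      rw [(PySem.Dict.contains_iff_mem_keys c x).mpr (hk.symm ▸ hx)] at hc; exact hc rfl
    rw [if_neg hc]
    exact ⟨hk, fun k hkk => by
      dsimp only
      rw [if_neg (fun (e : x = k) => hmem (by rw [e]; exact hkk))]
      ring, hm⟩

-- B's guarded decrement (the element leaving the window); `p` is the running pair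
lemma bumpP_sub (T : PySem.Dict String Int) (K : List String) (hnd : K.Nodup)
    (p : PySem.Dict String Int × Int) (x : String)
    (hk : p.1.keys = K)
    (hm : p.2 = (K.countP (fun k => p.1.getD k 0 == T.getD k 0) : Int)) :
    (if p.1.contains x then
        (p.1.insert x (p.1.getD x 0 - 1),
         if (p.1.insert x (p.1.getD x 0 - 1)).getD x 0 == T.getD x 0 then
           (if p.1.getD x 0 == T.getD x 0 then p.2 - 1 else p.2) + 1
         else (if p.1.getD x 0 == T.getD x 0 then p.2 - 1 else p.2))
      else p).1.keys = K
    ∧ (∀ k ∈ K,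
        (if p.1.contains x then
            (p.1.insert x (p.1.getD x 0 - 1),
             if (p.1.insert x (p.1.getD x 0 - 1)).getD x 0 == T.getD x 0 then
               (if p.1.getD x 0 == T.getD x 0 then p.2 - 1 else p.2) + 1
             else (if p.1.getD x 0 == T.getD x 0 then p.2 - 1 else p.2))
          else p).1.getD k 0 = p.1.getD k 0 - (if x = k then 1 else 0))
    ∧ (if p.1.contains x then
          (p.1.insert x (p.1.getD x 0 - 1),
           if (p.1.insert x (p.1.getD x 0 - 1)).getD x 0 == T.getD x 0 then
             (if p.1.getD x 0 == T.getD x 0 then p.2 - 1 else p.2) + 1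
           else (if p.1.getD x 0 == T.getD x 0 then p.2 - 1 else p.2))
        else p).2
      = (K.countP (fun k =>
          (if p.1.contains x then
              (p.1.insert x (p.1.getD x 0 - 1),
               if (p.1.insert x (p.1.getD x 0 - 1)).getD x 0 == T.getD x 0 then
                 (if p.1.getD x 0 == T.getD x 0 then p.2 - 1 else p.2) + 1
               else (if p.1.getD x 0 == T.getD x 0 then p.2 - 1 else p.2))
            else p).1.getD k 0 == T.getD k 0) : Int) := by
  by_cases hc : p.1.contains x
  · have hmem : x ∈ K := hk ▸ (PySem.Dict.contains_iff_mem_keys p.1 x).mp hc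
    rw [if_pos hc]
    refine ⟨by rw [PySem.Dict.keys_insert_of_contains p.1 _ hc, hk], ?_, ?_⟩
    · intro k hkk
      by_cases hx : x = k
      · subst hx; rw [PySem.Dict.getD_insert_self, if_pos rfl]
      · rw [PySem.Dict.getD_insert_of_ne _ _ _ (fun e => hx e.symm), if_neg hx]
        ring
    · dsimp only
      rw [countP_update K (fun k => p.1.getD k 0 == T.getD k 0)
            (fun k => (p.1.insert x (p.1.getD x 0 - 1)).getD k 0 == T.getD k 0) x hnd hmem
            (fun y _ hy => by
              show (p.1.getD y 0 == T.getD y 0)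
                = ((p.1.insert x (p.1.getD x 0 - 1)).getD y 0 == T.getD y 0)
              rw [PySem.Dict.getD_insert_of_ne _ _ _ hy]), ← hm,
          PySem.Dict.getD_insert_self]
      by_cases h1 : (p.1.getD x 0 - 1 == T.getD x 0) = true <;>
        by_cases h2 : (p.1.getD x 0 == T.getD x 0) = true <;>
          simp only [h1, h2, Bool.not_eq_true] at * <;> simp [h1, h2] <;> ring
  · have hmem : x ∉ K := fun hx => by
      rw [(PySem.Dict.contains_iff_mem_keys p.1 x).mpr (hk.symm ▸ hx)] at hc; exact hc rfl
    rw [if_neg hc]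
    exact ⟨hk, fun k hkk => by
      rw [if_neg (fun (e : x = k) => hmem (by rw [e]; exact hkk))]
      ring, hm⟩


-- "all keys matched" as B's integer comparison with need = len(target)
lemma countP_beq_need (want : List String) (number : List Int) (discount : List String)
    (j : Nat) :
    (((((pvTarget want number).keys.countP
          (fun k => pvV discount j k == (pvTarget want number).getD k 0) : Nat) : Int))
        == (((pvTarget want number).size : Nat) : Int)) = pvOK want number discount j := by
  rw [Bool.eq_iff_iff, beq_iff_eq]
  have hsz : (((pvTarget want number).size : Nat) : Int)
      = (((pvTarget want number).keys.length : Nat) : Int) := by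
    simp [PySem.Dict.size, PySem.Dict.keys]
  rw [hsz]
  unfold pvOK
  rw [decide_eq_true_iff]
  constructor
  · intro h k hkk
    have hcnt : (pvTarget want number).keys.countP
        (fun k => pvV discount j k == (pvTarget want number).getD k 0)
        = (pvTarget want number).keys.length := by exact_mod_cast h
    have := List.countP_eq_length.mp hcnt k hkk
    exact beq_iff_eq.mp this
  · intro h
    have : (pvTarget want number).keys.countP
        (fun k => pvV discount j k == (pvTarget want number).getD k 0)
        = (pvTarget want number).keys.length :=
      List.countP_eq_length.mpr (fun k hkk => beq_iff_eq.mpr (h k hkk))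
    exact_mod_cast this

-- one step of B's loop, characterised
lemma stepB_facts (want : List String) (number : List Int) (discount : List String)
    (i : Nat) (hlt : i < discount.length)
    (c : PySem.Dict String Int) (m r : Int)
    (hk : c.keys = (pvTarget want number).keys)
    (hv : ∀ k ∈ (pvTarget want number).keys, c.getD k 0 = pvV discount i k)
    (hm : m = ((pvTarget want number).keys.countP
            (fun k => c.getD k 0 == (pvTarget want number).getD k 0) : Int)) :
    (stepB (pvTarget want number) (((pvTarget want number).size : Nat) : Int) discount
        (c, m, r) (i : Int)).1.keys = (pvTarget want number).keys
    ∧ (∀ k ∈ (pvTarget want number).keys,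
        (stepB (pvTarget want number) (((pvTarget want number).size : Nat) : Int) discount
          (c, m, r) (i : Int)).1.getD k 0 = pvV discount (i + 1) k)
    ∧ (stepB (pvTarget want number) (((pvTarget want number).size : Nat) : Int) discount
          (c, m, r) (i : Int)).2.1
        = ((pvTarget want number).keys.countP
            (fun k => pvV discount (i + 1) k == (pvTarget want number).getD k 0) : Int)
    ∧ (stepB (pvTarget want number) (((pvTarget want number).size : Nat) : Int) discount
          (c, m, r) (i : Int)).2.2
        = if 9 ≤ i then
            (if pvOK want number discount (i + 1) then r + 1 else r)
          else r := by
  have hnd := pvK_nodup want number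
  have hx2 : PySem.List.pyGetD discount (i : Int) "" = discount[i]'hlt := by
    rw [PySem.List.pyGetD_natCast]
    exact List.getD_eq_getElem _ _ hlt
  have he : (stepB (pvTarget want number) (((pvTarget want number).size : Nat) : Int) discount
        (c, m, r) (i : Int)).2.2
      = if (9 : Int) ≤ (i : Int) then
          (if (stepB (pvTarget want number) (((pvTarget want number).size : Nat) : Int) discount
              (c, m, r) (i : Int)).2.1 == (((pvTarget want number).size : Nat) : Int)
           then r + 1 else r)
        else r := rfl
  obtain ⟨hak, hav, ham⟩ :=
    bumpP_add (pvTarget want number) (pvTarget want number).keys hnd c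
      (discount[i]'hlt) m hk hm
  by_cases h10 : 10 ≤ i
  · have hc10 : (10 : Int) ≤ (i : Int) := by exact_mod_cast h10
    have hx1 : PySem.List.pyGetD discount ((i : Int) - 10) ""
        = discount[i - 10]'(by omega) := by
      rw [(by omega : ((i : Int) - 10) = ((i - 10 : Nat) : Int)), PySem.List.pyGetD_natCast]
      exact List.getD_eq_getElem _ _ (by omega)
    obtain ⟨hsk, hsv, hsm⟩ :=
      bumpP_sub (pvTarget want number) (pvTarget want number).keys hnd _
        (discount[i - 10]'(by omega)) hak ham
    have hkeys : (stepB (pvTarget want number) (((pvTarget want number).size : Nat) : Int)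
        discount (c, m, r) (i : Int)).1.keys = (pvTarget want number).keys := by
      unfold stepB
      dsimp only
      rw [hx2, if_pos hc10, hx1]
      exact hsk
    have hval : ∀ k ∈ (pvTarget want number).keys,
        (stepB (pvTarget want number) (((pvTarget want number).size : Nat) : Int) discount
          (c, m, r) (i : Int)).1.getD k 0 = pvV discount (i + 1) k := by
      intro k hkk
      unfold stepB
      dsimp only
      rw [hx2, if_pos hc10, hx1, hsv k hkk, hav k hkk, hv k hkk,
          pvV_step_hi discount i h10 hlt k]
    have hmat : (stepB (pvTarget want number) (((pvTarget want number).size : Nat) : Int)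
          discount (c, m, r) (i : Int)).2.1
        = ((pvTarget want number).keys.countP
            (fun k => pvV discount (i + 1) k == (pvTarget want number).getD k 0) : Int) := by
      unfold stepB
      dsimp only
      rw [hx2, if_pos hc10, hx1, hsm]
      exact congrArg Nat.cast (List.countP_congr fun k hkk => by
        rw [hsv k hkk, hav k hkk, hv k hkk, pvV_step_hi discount i h10 hlt k])
    refine ⟨hkeys, hval, hmat, ?_⟩
    rw [he, hmat, countP_beq_need want number discount (i + 1),
        if_pos (show (9 : Int) ≤ (i : Int) by omega), if_pos (show 9 ≤ i by omega)]
  · have hc10 : ¬ (10 : Int) ≤ (i : Int) := by exact_mod_cast h10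
    have hkeys : (stepB (pvTarget want number) (((pvTarget want number).size : Nat) : Int)
        discount (c, m, r) (i : Int)).1.keys = (pvTarget want number).keys := by
      unfold stepB
      dsimp only
      rw [hx2, if_neg hc10]
      exact hak
    have hval : ∀ k ∈ (pvTarget want number).keys,
        (stepB (pvTarget want number) (((pvTarget want number).size : Nat) : Int) discount
          (c, m, r) (i : Int)).1.getD k 0 = pvV discount (i + 1) k := by
      intro k hkk
      unfold stepB
      dsimp only
      rw [hx2, if_neg hc10, hav k hkk, hv k hkk, pvV_step_lo discount i (by omega) hlt k]
    have hmat : (stepB (pvTarget want number) (((pvTarget want number).size : Nat) : Int)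
          discount (c, m, r) (i : Int)).2.1
        = ((pvTarget want number).keys.countP
            (fun k => pvV discount (i + 1) k == (pvTarget want number).getD k 0) : Int) := by
      unfold stepB
      dsimp only
      rw [hx2, if_neg hc10, ham]
      exact congrArg Nat.cast (List.countP_congr fun k hkk => by
        rw [hav k hkk, hv k hkk, pvV_step_lo discount i (by omega) hlt k])
    refine ⟨hkeys, hval, hmat, ?_⟩
    rw [he, hmat, countP_beq_need want number discount (i + 1)]
    by_cases h9 : 9 ≤ i
    · rw [if_pos (show (9 : Int) ≤ (i : Int) by exact_mod_cast h9), if_pos (show 9 ≤ i from h9)]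
    · rw [if_neg (show ¬ (9 : Int) ≤ (i : Int) by exact_mod_cast h9), if_neg (show ¬ 9 ≤ i from h9)]

-- B's main loop
lemma B_loop (want : List String) (number : List Int) (discount : List String) :
    ∀ (fuel i : Nat) (c : PySem.Dict String Int) (m r : Int),
      fuel = discount.length - i → i ≤ discount.length →
      c.keys = (pvTarget want number).keys →
      (∀ k ∈ (pvTarget want number).keys, c.getD k 0 = pvV discount i k) →
      m = ((pvTarget want number).keys.countP
            (fun k => c.getD k 0 == (pvTarget want number).getD k 0) : Int) →
      ((PySem.List.pyRange (i : Int) (discount.length : Int) 1).foldl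
          (stepB (pvTarget want number) (((pvTarget want number).size : Nat) : Int) discount)
          (c, m, r)).2.1
        = ((pvTarget want number).keys.countP
            (fun k => pvV discount discount.length k == (pvTarget want number).getD k 0) : Int)
      ∧ ((PySem.List.pyRange (i : Int) (discount.length : Int) 1).foldl
          (stepB (pvTarget want number) (((pvTarget want number).size : Nat) : Int) discount)
          (c, m, r)).2.2
        = r + (((List.range' (max (i + 1) 10) (discount.length + 1 - max (i + 1) 10)).countP
              (pvOK want number discount) : Nat) : Int) := by
  intro fuel
  induction fuel with
  | zero =>
    intro i c m r hf hle hk hv hm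
    have hni : discount.length ≤ i := by omega
    rw [PySem.List.pyRange_one_eq_nil (by exact_mod_cast hni),
        (by omega : discount.length + 1 - max (i + 1) 10 = 0)]
    refine ⟨?_, by simp⟩
    dsimp only [List.foldl_nil]
    rw [hm]
    congr 1
    refine List.countP_congr fun k hkk => ?_
    show (c.getD k 0 == (pvTarget want number).getD k 0) = true
      ↔ (pvV discount discount.length k == (pvTarget want number).getD k 0) = true
    rw [hv k hkk, (by omega : i = discount.length)]
  | succ f ih =>
    intro i c m r hf hle hk hv hm
    by_cases hlt : i < discount.length
    · rw [PySem.List.pyRange_one_cons (by exact_mod_cast hlt), List.foldl_cons]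
      obtain ⟨hk', hv', hm', hr'⟩ := stepB_facts want number discount i hlt c m r hk hv hm
      have hm'' : (stepB (pvTarget want number) (((pvTarget want number).size : Nat) : Int)
            discount (c, m, r) (i : Int)).2.1
          = ((pvTarget want number).keys.countP
              (fun k => (stepB (pvTarget want number)
                  (((pvTarget want number).size : Nat) : Int) discount
                  (c, m, r) (i : Int)).1.getD k 0
                == (pvTarget want number).getD k 0) : Int) := by
        rw [hm']
        congr 1
        refine congrArg Nat.cast (List.countP_congr fun k hkk => ?_)
        show (pvV discount (i + 1) k == (pvTarget want number).getD k 0) = true ↔ _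
        rw [hv' k hkk]
      have heta : stepB (pvTarget want number) (((pvTarget want number).size : Nat) : Int)
            discount (c, m, r) (i : Int)
          = ((stepB (pvTarget want number) (((pvTarget want number).size : Nat) : Int)
                discount (c, m, r) (i : Int)).1,
             (stepB (pvTarget want number) (((pvTarget want number).size : Nat) : Int)
                discount (c, m, r) (i : Int)).2.1,
             (stepB (pvTarget want number) (((pvTarget want number).size : Nat) : Int)
                discount (c, m, r) (i : Int)).2.2) := rfl
      rw [heta,
          (by push_cast; ring : ((i : Int) + 1) = ((i + 1 : Nat) : Int))]
      obtain ⟨ihm, ihr⟩ := ih (i + 1) _ _ _ (by omega) (by omega) hk' hv' hm''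
      refine ⟨ihm, ?_⟩
      rw [ihr, hr']
      by_cases h9 : 9 ≤ i
      · rw [if_pos h9,
            (by omega : max (i + 1) 10 = i + 1),
            (by omega : discount.length + 1 - (i + 1) = (discount.length + 1 - (i + 2)) + 1),
            List.range'_succ, List.countP_cons,
            (by omega : max (i + 1 + 1) 10 = i + 2)]
        by_cases hok : pvOK want number discount (i + 1) <;> simp [hok] <;> push_cast <;> ring
      · rw [if_neg h9,
            (by omega : max (i + 1) 10 = 10),
            (by omega : max (i + 1 + 1) 10 = 10)]
    · rw [PySem.List.pyRange_one_eq_nil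
            (by exact_mod_cast (by omega : discount.length ≤ i)),
          (by omega : discount.length + 1 - max (i + 1) 10 = 0)]
      refine ⟨?_, by simp⟩
      dsimp only [List.foldl_nil]
      rw [hm]
      congr 1
      refine List.countP_congr fun k hkk => ?_
      show (c.getD k 0 == (pvTarget want number).getD k 0) = true
        ↔ (pvV discount discount.length k == (pvTarget want number).getD k 0) = true
      rw [hv k hkk, (by omega : i = discount.length)]


lemma pvV_ten (discount : List String) (k : String) :
    pvV discount 10 k = pvP discount 10 k := by
  unfold pvV
  rw [(rfl : (10 - 10 : Nat) = 0), pvP_zero]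
  ring

lemma pvV_clamp_small (discount : List String) (hn : discount.length < 10) (k : String) :
    pvV discount discount.length k = pvV discount 10 k := by
  unfold pvV
  rw [(by omega : discount.length - 10 = 0), (rfl : (10 - 10 : Nat) = 0), pvP_zero,
      pvP_clamp discount 10 (by omega) k]

lemma pvOK_small (want : List String) (number : List Int) (discount : List String)
    (hn : discount.length < 10) :
    pvOK want number discount discount.length = pvOK want number discount 10 := by
  unfold pvOK
  rw [decide_eq_decide]
  exact forall_congr' fun k => forall_congr' fun hkk => by
    rw [pvV_clamp_small discount hn k]

lemma foldl_idx_zip0 {σ : Type} (g : σ → String → Int → σ) (want : List String)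
    (number : List Int) (h : want.length ≤ number.length) (init : σ) :
    (PySem.List.pyRange 0 (want.length : Int) 1).foldl
        (fun s i => g s (PySem.List.pyGetD want i "") (PySem.List.pyGetD number i 0)) init
      = (want.zip number).foldl (fun s kv => g s kv.1 kv.2) init := by
  have := foldl_idx_zip g want number h want.length 0 (by omega) init
  simpa using this

lemma foldl_idx_zip0_ins (want : List String) (number : List Int)
    (h : want.length ≤ number.length) (init : PySem.Dict String Int) :
    (PySem.List.pyRange 0 (want.length : Int) 1).foldl
        (fun d i => d.insert (PySem.List.pyGetD want i "") (PySem.List.pyGetD number i 0)) init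
      = (want.zip number).foldl (fun d kv => d.insert kv.1 kv.2) init :=
  foldl_idx_zip0 (fun d a b => d.insert a b) want number h init

lemma foldl_idx_zip0_zero (want : List String) (number : List Int)
    (h : want.length ≤ number.length) (init : PySem.Dict String Int) :
    (PySem.List.pyRange 0 (want.length : Int) 1).foldl
        (fun d i => d.insert (PySem.List.pyGetD want i "") 0) init
      = (want.zip number).foldl (fun d kv => d.insert kv.1 0) init :=
  foldl_idx_zip0 (fun d a _ => d.insert a 0) want number h init

lemma init_eq (want : List String) (number : List Int) (h : want.length ≤ number.length) :
    (PySem.List.pyRange 0 (want.length : Int) 1).foldl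
        (fun st i =>
          (st.1.insert (PySem.List.pyGetD want i "") (PySem.List.pyGetD number i 0),
           st.2.insert (PySem.List.pyGetD want i "") 0))
        (PySem.Dict.empty, PySem.Dict.empty)
      = (pvTarget want number, pvZ want number) := by
  rw [PySem.List.foldl_prod_mk
        (fun (d : PySem.Dict String Int) (i : Int) =>
          d.insert (PySem.List.pyGetD want i "") (PySem.List.pyGetD number i 0))
        (fun (d : PySem.Dict String Int) (i : Int) =>
          d.insert (PySem.List.pyGetD want i "") 0)
        (PySem.List.pyRange 0 (want.length : Int) 1) PySem.Dict.empty PySem.Dict.empty,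
      foldl_idx_zip0_ins want number h PySem.Dict.empty,
      foldl_idx_zip0_zero want number h PySem.Dict.empty]
  rfl

lemma pvZ_keys (want : List String) (number : List Int) :
    (pvZ want number).keys = (pvTarget want number).keys := by
  unfold pvZ pvTarget
  rw [PySem.Dict.keys_foldl_insert_key (want.zip number) Prod.fst (fun _ _ => (0 : Int))
        PySem.Dict.empty,
      PySem.Dict.keys_foldl_insert_key (want.zip number) Prod.fst (fun _ kv => kv.2)
        PySem.Dict.empty]

lemma pvZ_getD (want : List String) (number : List Int) (k : String) :
    (pvZ want number).getD k 0 = 0 := by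
  unfold pvZ
  rw [getD_foldl_insert_zero Prod.fst (want.zip number) PySem.Dict.empty k]
  split <;> simp [PySem.Dict.getD_empty]

-- A equals the common spec
lemma A_eq_spec (want : List String) (number : List Int) (discount : List String)
    (h : want.length ≤ number.length) :
    solution want number discount = pvSpec want number discount := by
  unfold solution
  dsimp only
  rw [init_eq want number h]
  dsimp only
  rw [PySem.List.slice_to discount (b := 10) (by norm_num),
      (show ((10 : Int)).toNat = 10 from rfl)]
  have hrk : ((discount.take 10).foldl
      (fun d k => if (d.get? k).isSome then d.insert k (d.getD k 0 + 1) else d)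
      (pvZ want number)).keys = (pvTarget want number).keys := by
    rw [addfold_keys]; exact pvZ_keys want number
  have hrv : ∀ k ∈ (pvTarget want number).keys,
      ((discount.take 10).foldl
        (fun d k => if (d.get? k).isSome then d.insert k (d.getD k 0 + 1) else d)
        (pvZ want number)).getD k 0 = pvV discount 10 k := by
    intro k hkk
    rw [addfold_getD (discount.take 10) (pvZ want number) k
          (by rw [pvZ_keys want number]; exact hkk),
        pvZ_getD want number k, pvV_ten]
    unfold pvP
    ring
  rw [check_eq_pvOK want number discount 10 _ hrk hrv]
  have hA := A_loop want number discount (discount.length - 10) 10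
    (if pvOK want number discount 10 = true then 0 + 1 else 0) _ rfl (le_refl 10) hrk hrv
  rw [show ((10 : Nat) : Int) = (10 : Int) from by norm_num] at hA
  rw [hA]
  unfold pvSpec
  by_cases hn : discount.length ≤ 10
  · rw [(by omega : discount.length + 1 - (10 + 1) = 0),
        (by omega : max 1 (discount.length - 9) = 1), List.range'_one]
    by_cases hok : pvOK want number discount 10 <;> simp [hok]
  · rw [(by omega : max 1 (discount.length - 9) = (discount.length + 1 - (10 + 1)) + 1),
        List.range'_succ, List.countP_cons]
    by_cases hok : pvOK want number discount 10 <;> simp [hok] <;> push_cast <;> ring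

-- identity-keyed variant of the constant-zero dict fold
lemma getD_foldl_insert_zero_id :
    ∀ (l : List String) (d : PySem.Dict String Int) (k : String),
      (l.foldl (fun d x => d.insert x 0) d).getD k 0
        = if k ∈ l then 0 else d.getD k 0 := by
  intro l
  induction l with
  | nil => intro d k; simp
  | cons a t ih =>
    intro d k
    rw [List.foldl_cons, ih]
    by_cases hm : k ∈ t
    · simp [hm]
    · by_cases hk : k = a
      · simp [hm, hk, PySem.Dict.getD_insert_self]
      · simp [hm, hk, PySem.Dict.getD_insert_of_ne _ _ _ hk]

-- B equals the common spec
lemma B_eq_spec (want : List String) (number : List Int) (discount : List String) :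
    solution_alt want number discount = pvSpec want number discount := by
  unfold solution_alt
  dsimp only
  rw [show (want.zip number).foldl (fun d kv => d.insert kv.1 kv.2) PySem.Dict.empty
        = pvTarget want number from rfl]
  have hck : ((pvTarget want number).keys.foldl (fun (d : PySem.Dict String Int) k => d.insert k 0)
      PySem.Dict.empty).keys = (pvTarget want number).keys := by
    rw [PySem.Dict.keys_foldl_insert (pvTarget want number).keys (fun _ _ => (0 : Int))
          PySem.Dict.empty,
        PySem.Dict.keys_empty, PySem.Set.update_nil_left,
        PySem.Set.ofList_eq_self_of_nodup _ (pvK_nodup want number)]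
  have hcv : ∀ k : String,
      ((pvTarget want number).keys.foldl (fun (d : PySem.Dict String Int) k => d.insert k 0)
        PySem.Dict.empty).getD k 0 = 0 := by
    intro k
    rw [getD_foldl_insert_zero_id (pvTarget want number).keys PySem.Dict.empty k]
    split <;> simp [PySem.Dict.getD_empty]
  have hm0 : (pvTarget want number).values.foldl
        (fun acc v => if v == 0 then acc + 1 else acc) 0
      = ((pvTarget want number).keys.countP
          (fun k => ((pvTarget want number).keys.foldl (fun (d : PySem.Dict String Int) k => d.insert k 0)
              PySem.Dict.empty).getD k 0 == (pvTarget want number).getD k 0) : Int) := by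
    rw [PySem.List.foldl_if_add_one (fun v => v == (0 : Int)) (pvTarget want number).values 0,
        PySem.Dict.values_eq_map_keys (pvTarget want number) (pvK_nodup want number) 0,
        List.countP_map]
    rw [List.countP_congr (fun k hkk => by
      show ((fun v => v == (0 : Int)) ∘ fun k => (pvTarget want number).getD k 0) k = true
        ↔ (((pvTarget want number).keys.foldl (fun (d : PySem.Dict String Int) k => d.insert k 0)
            PySem.Dict.empty).getD k 0 == (pvTarget want number).getD k 0) = true
      simp only [Function.comp]
      rw [hcv k, beq_iff_eq, beq_iff_eq]
      exact eq_comm)]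
    ring
  obtain ⟨hBm, hBr⟩ := by
    have hB := B_loop want number discount discount.length 0 _ _ 0 (by omega) (by omega)
      hck (fun k hkk => by rw [hcv k, pvV_zero]) hm0
    rw [show ((0 : Nat) : Int) = (0 : Int) from by norm_num] at hB
    exact hB
  by_cases hn : discount.length < 10
  · rw [if_pos hn, hBm, hBr,
        (by omega : max (0 + 1) 10 = 10),
        (by omega : discount.length + 1 - 10 = 0)]
    rw [countP_beq_need want number discount discount.length, pvOK_small want number discount hn]
    unfold pvSpec
    rw [(by omega : max 1 (discount.length - 9) = 1), List.range'_one]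
    by_cases hok : pvOK want number discount 10 <;> simp [hok]
  · rw [if_neg hn, hBr, (by omega : max (0 + 1) 10 = 10)]
    unfold pvSpec
    rw [(by omega : max 1 (discount.length - 9) = discount.length + 1 - 10)]
    push_cast
    ring

-- ===== VERDICT (by name: the statement is the Claim_ definition above) =====
theorem solution_spec : Claim_equal_solution := by
  intro want number discount _ hpre
  unfold Spec_solution
  rw [A_eq_spec want number discount hpre, B_eq_spec want number discount]
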